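-- pv_equiv track=rewrite | github.com/493-Property-Estimator/Capstone-Test-Repo | src/data_sourcing/pipelines.py | _choose_common_value
-- ===== SOURCE A (Python) =====
-- from collections import defaultdict
-- from typing import Any
--
-- def _normalize_text(value: Any) -> str | None:
--     if value is None:
--         return None
--     text = str(value).strip()
--     if not text:
--         return None
--     return " ".join(text.split())
--
-- def _choose_common_value(values: list[Any]) -> Any:
--     counts: dict[Any, int] = defaultdict(int)
--     for value in values:
--         normalized = _normalize_text(value)
--         if normalized is None:
--             continue
--         counts[normalized] += 1
--     if not counts:
--         return None
--     return max(counts.items(), key=lambda item: (item[1], item[0]))[0]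
-- ===== SOURCE B (Python) =====
-- def _normalize_text(value):
--     if value is None:
--         return None
--     text = str(value).strip()
--     if not text:
--         return None
--     return " ".join(text.split())
--
-- def _choose_common_value(values):
--     norms = [n for v in values if (n := _normalize_text(v)) is not None]
--     if not norms:
--         return None
--     norms.sort()
--     best_value, best_count = norms[0], 0
--     cur_value, cur_count = norms[0], 0
--     for n in norms:
--         if n == cur_value:
--             cur_count += 1
--         else:
--             if cur_count >= best_count:
--                 best_value, best_count = cur_value, cur_count
--             cur_value, cur_count = n, 1
--     if cur_count >= best_count:
--         best_value = cur_value
--     return best_value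
-- ===== Notes on version B (the rewrite author's own statement) =====
-- stated objective: alternative
-- what changed: Replaces the dict-counting pass plus max over items with a filter-then-sort followed by a single run-length sweep that tracks the current group and the best (count, value) so far.
import Mathlib
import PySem

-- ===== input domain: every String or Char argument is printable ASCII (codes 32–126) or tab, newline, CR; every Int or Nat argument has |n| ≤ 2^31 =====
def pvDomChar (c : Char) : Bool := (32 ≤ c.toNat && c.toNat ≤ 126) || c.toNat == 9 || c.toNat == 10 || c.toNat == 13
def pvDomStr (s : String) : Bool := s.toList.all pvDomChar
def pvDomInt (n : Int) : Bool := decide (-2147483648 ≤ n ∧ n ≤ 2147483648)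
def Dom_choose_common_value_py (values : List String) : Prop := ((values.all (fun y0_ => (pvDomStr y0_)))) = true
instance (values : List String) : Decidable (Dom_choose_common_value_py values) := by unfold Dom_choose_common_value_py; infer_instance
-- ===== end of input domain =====

-- B replaces A's dict-counting + max over items by sort-then-run-length-sweep (alternative decomposition, same result).

-- ===== PORT A =====
-- shared helper: port of _normalize_text (the 'value is None' branch cannot fire for a String argument)
def normalize_text_py (value : String) : Option String :=
  let text := PySem.Str.strip value
  if text = "" then none
  else some (PySem.Str.join " " (PySem.Str.split₀ text))

def choose_common_value_py (values : List String) : Option String :=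
  let counts : PySem.Dict String Int :=
    values.foldl (fun d v =>
      match normalize_text_py v with
      | none => d
      | some n => d.modify n 0 (· + 1)) PySem.Dict.empty
  if counts.items = [] then none
  else
    match PySem.List.max2? counts.items (fun p => p.2) (fun p => p.1) with
    | none => none
    | some p => some p.1

-- ===== PORT B =====
-- the sweep loop of Source B: (best_value, best_count, cur_value, cur_count) over the remaining list
def altSweep (best cur : String) (bcnt ccnt : Int) : List String → String
  | [] => if ccnt ≥ bcnt then cur else best
  | n :: rest =>
    if n = cur then altSweep best cur bcnt (ccnt + 1) rest
    else if ccnt ≥ bcnt then altSweep cur n ccnt 1 rest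
    else altSweep best n bcnt 1 rest

def choose_common_value_py_alt (values : List String) : Option String :=
  let norms := values.filterMap normalize_text_py
  match PySem.List.sorted norms (fun x => x) false with
  | [] => none
  | h :: t => some (altSweep h h 0 0 (h :: t))

-- ===== PRECONDITION & SPEC =====
def Spec_choose_common_value_py (values : List String) (out : Option String) : Prop := out = choose_common_value_py_alt values
instance (values : List String) (out : Option String) : Decidable (Spec_choose_common_value_py values out) := by unfold Spec_choose_common_value_py; infer_instance

-- ===== CLAIM (what is proved, stated in full; the proofs are below) =====
def Claim_equal_choose_common_value_py : Prop := ∀ (values : List String), Dom_choose_common_value_py values → Spec_choose_common_value_py values (choose_common_value_py values)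

-- ===== LEMMAS AND PROOFS =====

-- r is the (unique) value of L maximal by (multiplicity in L, value), lexicographically
def IsArg (L : List String) (r : String) : Prop :=
  r ∈ L ∧ ∀ v ∈ L, L.count v < L.count r ∨ (L.count v = L.count r ∧ v ≤ r)

theorem isArg_unique {L : List String} {r₁ r₂ : String}
    (h₁ : IsArg L r₁) (h₂ : IsArg L r₂) : r₁ = r₂ := by
  obtain ⟨m₁, a₁⟩ := h₁
  obtain ⟨m₂, a₂⟩ := h₂
  rcases a₁ r₂ m₂ with h | ⟨hc, hle⟩ <;> rcases a₂ r₁ m₁ with h' | ⟨hc', hle'⟩ <;>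
    first
      | omega
      | exact le_antisymm hle' hle

-- A's loop over values is the counting loop over the normalized survivors
theorem foldA_eq_counter (values : List String) (d : PySem.Dict String Int) :
    values.foldl (fun d v =>
      match normalize_text_py v with
      | none => d
      | some n => d.modify n 0 (· + 1)) d
    = (values.filterMap normalize_text_py).foldl (fun d n => d.modify n 0 (· + 1)) d := by
  induction values generalizing d with
  | nil => rfl
  | cons v vs ih =>
    simp only [List.foldl_cons, List.filterMap_cons]
    cases normalize_text_py v <;> simp [ih]

-- max2? with keys (count, value) returns a lexicographic maximum (first maximal element)
theorem max2_cons_spec (t : List (String × Int)) :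
    ∀ m0, ∃ m, PySem.List.max2? (m0 :: t) (fun p => p.2) (fun p => p.1) = some m
      ∧ (m = m0 ∨ m ∈ t) ∧ (m0.2 < m.2 ∨ (m0.2 = m.2 ∧ m0.1 ≤ m.1))
      ∧ ∀ x ∈ t, x.2 < m.2 ∨ (x.2 = m.2 ∧ x.1 ≤ m.1) := by
  induction t with
  | nil =>
    intro m0
    exact ⟨m0, by simp [PySem.List.max2?], Or.inl rfl, Or.inr ⟨rfl, le_refl _⟩, by simp⟩
  | cons x xs ih =>
    intro m0
    by_cases h1 : m0.2 < x.2
    · have hb : PySem.List.max2? (m0 :: x :: xs) (fun p => p.2) (fun p => p.1)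
          = PySem.List.max2? (x :: xs) (fun p => p.2) (fun p => p.1) := by
        simp [PySem.List.max2?, h1]
      obtain ⟨m, hm, hmem, hge, hall⟩ := ih x
      rw [hb]
      refine ⟨m, hm, ?_, ?_, ?_⟩
      · rcases hmem with h' | h' <;> simp [h']
      · rcases hge with h' | ⟨e, _⟩
        · exact Or.inl (lt_trans h1 h')
        · exact Or.inl (e ▸ h1)
      · intro y hy
        rcases List.mem_cons.mp hy with hy | hy
        · exact hy ▸ hge
        · exact hall y hy
    · by_cases h2 : x.2 < m0.2
      · have hb : PySem.List.max2? (m0 :: x :: xs) (fun p => p.2) (fun p => p.1)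
            = PySem.List.max2? (m0 :: xs) (fun p => p.2) (fun p => p.1) := by
          simp [PySem.List.max2?, h1, not_le.mpr h2]
        obtain ⟨m, hm, hmem, hge, hall⟩ := ih m0
        rw [hb]
        refine ⟨m, hm, ?_, hge, ?_⟩
        · rcases hmem with h' | h' <;> simp [h']
        · intro y hy
          rcases List.mem_cons.mp hy with hy | hy
          · subst hy
            rcases hge with h' | ⟨e, _⟩
            · exact Or.inl (lt_trans h2 h')
            · exact Or.inl (e ▸ h2)
          · exact hall y hy
      · have hq : m0.2 = x.2 := le_antisymm (not_lt.mp h2) (not_lt.mp h1)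
        by_cases h3 : m0.1 < x.1
        · have hb : PySem.List.max2? (m0 :: x :: xs) (fun p => p.2) (fun p => p.1)
              = PySem.List.max2? (x :: xs) (fun p => p.2) (fun p => p.1) := by
            simp [PySem.List.max2?, h1, le_of_eq hq, String.lt_iff_toList_lt.mp h3]
          obtain ⟨m, hm, hmem, hge, hall⟩ := ih x
          rw [hb]
          refine ⟨m, hm, ?_, ?_, ?_⟩
          · rcases hmem with h' | h' <;> simp [h']
          · rcases hge with h' | ⟨e, hle⟩
            · exact Or.inl (hq ▸ h')
            · exact Or.inr ⟨hq.trans e, le_trans (le_of_lt h3) hle⟩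
          · intro y hy
            rcases List.mem_cons.mp hy with hy | hy
            · exact hy ▸ hge
            · exact hall y hy
        · have hb : PySem.List.max2? (m0 :: x :: xs) (fun p => p.2) (fun p => p.1)
              = PySem.List.max2? (m0 :: xs) (fun p => p.2) (fun p => p.1) := by
            have h3' : ¬ m0.1.toList < x.1.toList := fun hh => h3 (String.lt_iff_toList_lt.mpr hh)
            simp [PySem.List.max2?, h1, h3']
          obtain ⟨m, hm, hmem, hge, hall⟩ := ih m0
          rw [hb]
          refine ⟨m, hm, ?_, hge, ?_⟩
          · rcases hmem with h' | h' <;> simp [h']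
          · intro y hy
            rcases List.mem_cons.mp hy with hy | hy
            · subst hy
              rcases hge with h' | ⟨e, hle⟩
              · exact Or.inl (hq ▸ h')
              · exact Or.inr ⟨hq.symm.trans e, le_trans (not_lt.mp h3) hle⟩
            · exact hall y hy

-- the step of Source B's final selection, as a fold step on (value, count) pairs
def pfStep (m x : String × Int) : String × Int := if m.2 ≤ x.2 then x else m

-- run-length encoding of the remaining sorted list, seeded with the current group
def rleAux (c : String) (k : Int) : List String → List (String × Int)
  | [] => [(c, k)]
  | x :: xs => if x = c then rleAux c (k + 1) xs else (c, k) :: rleAux x 1 xs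

theorem sweep_eq_pf (rest : List String) :
    ∀ (best cur : String) (bcnt ccnt : Int),
    altSweep best cur bcnt ccnt rest = ((rleAux cur ccnt rest).foldl pfStep (best, bcnt)).1 := by
  induction rest with
  | nil =>
    intro best cur bcnt ccnt
    simp only [altSweep, rleAux, List.foldl_cons, List.foldl_nil, pfStep, ge_iff_le]
    split_ifs <;> rfl
  | cons n rest ih =>
    intro best cur bcnt ccnt
    by_cases h : n = cur
    · simp only [altSweep, rleAux, h, if_pos, ih]
    · simp only [altSweep, rleAux, h, if_neg, not_false_iff, List.foldl_cons, pfStep, ge_iff_le]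
      split_ifs with h1 <;> simp [ih]

theorem rle_char (rest : List String) :
    ∀ (cur : String) (ccnt : Int),
    rest.Pairwise (· ≤ ·) → (∀ x ∈ rest, cur ≤ x) →
    ∃ l, rleAux cur ccnt rest = (cur, ccnt + (rest.count cur : Int)) :: l
      ∧ (∀ p ∈ l, p.1 ∈ rest ∧ p.1 ≠ cur ∧ p.2 = (rest.count p.1 : Int))
      ∧ ((cur, ccnt + (rest.count cur : Int)) :: l).Pairwise (fun p q => p.1 < q.1)
      ∧ ∀ v ∈ rest, v ≠ cur → ∃ p ∈ l, p.1 = v := by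
  induction rest with
  | nil =>
    intro cur ccnt _ _
    exact ⟨[], by simp [rleAux], by simp, by simp, by simp⟩
  | cons x xs ih =>
    intro cur ccnt hsort hle
    have hx : cur ≤ x := hle x (by simp)
    have hxs : ∀ y ∈ xs, x ≤ y := fun y hy => (List.pairwise_cons.mp hsort).1 y hy
    have hsort' : xs.Pairwise (· ≤ ·) := (List.pairwise_cons.mp hsort).2
    by_cases h : x = cur
    · subst h
      obtain ⟨l, heq, hpairs, hpw, hcov⟩ := ih x (ccnt + 1) hsort' hxs
      have hkey : ccnt + (((x :: xs).count x : Int)) = ccnt + 1 + ((xs.count x : Int)) := by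
        rw [List.count_cons_self]; push_cast; ring
      refine ⟨l, ?_, ?_, ?_, ?_⟩
      · rw [hkey, ← heq]; simp [rleAux]
      · intro p hp
        obtain ⟨h1, h2, h3⟩ := hpairs p hp
        exact ⟨List.mem_cons_of_mem _ h1, h2, by rw [List.count_cons_of_ne (Ne.symm h2), h3]⟩
      · rw [hkey]; exact hpw
      · intro v hv hne
        rcases List.mem_cons.mp hv with h | h
        · exact absurd h hne
        · exact hcov v h hne
    · have hcx : cur < x := lt_of_le_of_ne hx (fun e => h e.symm)
      have hnotin : cur ∉ x :: xs := by
        intro hmem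
        rcases List.mem_cons.mp hmem with hc | hc
        · exact h hc.symm
        · exact absurd (hxs cur hc) (not_le.mpr hcx)
      obtain ⟨l', heq, hpairs, hpw, hcov⟩ := ih x 1 hsort' hxs
      have hcnt0 : (x :: xs).count cur = 0 := List.count_eq_zero.mpr hnotin
      refine ⟨(x, 1 + (xs.count x : Int)) :: l', ?_, ?_, ?_, ?_⟩
      · simp only [rleAux, h, if_neg, not_false_iff, hcnt0, Nat.cast_zero, add_zero, heq]
      · intro p hp
        rcases List.mem_cons.mp hp with hp | hp
        · subst hp
          exact ⟨by simp, fun e => h e, by rw [List.count_cons_self]; push_cast; ring⟩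
        · obtain ⟨h1, h2, h3⟩ := hpairs p hp
          have hxp : x ≤ p.1 := hxs _ h1
          refine ⟨List.mem_cons_of_mem _ h1, fun e => absurd (e ▸ hxp) (not_le.mpr hcx), ?_⟩
          rw [List.count_cons_of_ne (Ne.symm h2), h3]
      · constructor
        · intro q hq
          rcases List.mem_cons.mp hq with hq | hq
          · subst hq; exact hcx
          · obtain ⟨h1, _, _⟩ := hpairs q hq
            exact lt_of_lt_of_le hcx (hxs _ h1)
        · exact hpw
      · intro v hv hne
        rcases List.mem_cons.mp hv with hv | hv
        · exact ⟨(x, 1 + (xs.count x : Int)), by simp, by simp [hv]⟩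
        · by_cases hvx : v = x
          · exact ⟨(x, 1 + (xs.count x : Int)), by simp, by simp [hvx]⟩
          · obtain ⟨p, hp, hp1⟩ := hcov v hv hvx
            exact ⟨p, List.mem_cons_of_mem _ hp, hp1⟩

theorem pf_spec (l : List (String × Int)) :
    ∀ (b : String × Int),
    l.Pairwise (fun p q => p.1 < q.1) → (∀ x ∈ l, b.1 < x.1) →
    (l.foldl pfStep b = b ∨ l.foldl pfStep b ∈ l)
      ∧ b.2 ≤ (l.foldl pfStep b).2 ∧ b.1 ≤ (l.foldl pfStep b).1
      ∧ ∀ x ∈ l, x.2 < (l.foldl pfStep b).2 ∨ (x.2 = (l.foldl pfStep b).2 ∧ x.1 ≤ (l.foldl pfStep b).1) := by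
  induction l with
  | nil => intro b _ _; exact ⟨Or.inl rfl, le_refl _, le_refl _, by simp⟩
  | cons x xs ih =>
    intro b hpw hb
    have hxxs : ∀ y ∈ xs, x.1 < y.1 := fun y hy => (List.pairwise_cons.mp hpw).1 y hy
    have hbx : (b.2 ≤ x.2 ∧ pfStep b x = x) ∨ (x.2 < b.2 ∧ pfStep b x = b) := by
      unfold pfStep; split_ifs with hc
      · exact Or.inl ⟨hc, rfl⟩
      · exact Or.inr ⟨not_le.mp hc, rfl⟩
    have hb' : ∀ y ∈ xs, (pfStep b x).1 < y.1 := by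
      intro y hy
      rcases hbx with ⟨_, e⟩ | ⟨_, e⟩
      · rw [e]; exact hxxs y hy
      · rw [e]; exact hb y (List.mem_cons_of_mem _ hy)
    obtain ⟨hmem, h2, h1, hall⟩ := ih (pfStep b x) (List.pairwise_cons.mp hpw).2 hb'
    simp only [List.foldl_cons]
    refine ⟨?_, ?_, ?_, ?_⟩
    · rcases hmem with h' | h'
      · rcases hbx with ⟨_, e⟩ | ⟨_, e⟩
        · rw [e] at h'; rw [e]; exact Or.inr (by simp [h'])
        · rw [e] at h'; rw [e]; exact Or.inl h'
      · exact Or.inr (List.mem_cons_of_mem _ h')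
    · rcases hbx with ⟨hc, e⟩ | ⟨_, e⟩
      · rw [e] at h2; rw [e]; exact le_trans hc h2
      · rw [e] at h2; rw [e]; exact h2
    · rcases hbx with ⟨hc, e⟩ | ⟨_, e⟩
      · rw [e] at h1; rw [e]; exact le_trans (le_of_lt (hb x (by simp))) h1
      · rw [e] at h1; rw [e]; exact h1
    · intro y hy
      rcases List.mem_cons.mp hy with hy | hy
      · subst hy
        rcases hbx with ⟨hc, e⟩ | ⟨hc, e⟩
        · rw [e] at h2 h1 hall; rw [e]
          rcases lt_or_eq_of_le h2 with h' | h'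
          · exact Or.inl h'
          · exact Or.inr ⟨h', h1⟩
        · rw [e] at h2; rw [e]
          exact Or.inl (lt_of_lt_of_le hc h2)
      · rcases hbx with ⟨_, e⟩ | ⟨_, e⟩ <;> (rw [e] at hall; rw [e]; exact hall y hy)

-- lexicographic (count, value) facts cast from Int to Nat
theorem int_lex {a b : Nat} {x y : String}
    (h : (a : Int) < (b : Int) ∨ ((a : Int) = (b : Int) ∧ x ≤ y)) :
    a < b ∨ (a = b ∧ x ≤ y) := by
  rcases h with h | ⟨h1, h2⟩
  · exact Or.inl (by exact_mod_cast h)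
  · exact Or.inr ⟨by exact_mod_cast h1, h2⟩

theorem isArg_of_perm {s norms : List String} {r : String}
    (hp : s.Perm norms) (h : IsArg s r) : IsArg norms r := by
  obtain ⟨hm, ha⟩ := h
  refine ⟨hp.mem_iff.mp hm, fun v hv => ?_⟩
  rw [← hp.count_eq v, ← hp.count_eq r]
  exact ha v (hp.mem_iff.mpr hv)

-- A returns an IsArg value when the normalized list is non-empty
theorem a_isArg (values : List String) (hne : values.filterMap normalize_text_py ≠ []) :
    ∃ r, choose_common_value_py values = some r ∧ IsArg (values.filterMap normalize_text_py) r := by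
  set norms := values.filterMap normalize_text_py with hn
  have hfold : values.foldl (fun d v =>
      match normalize_text_py v with
      | none => d
      | some n => d.modify n 0 (· + 1)) (PySem.Dict.empty : PySem.Dict String Int) = PySem.Dict.counter norms := by
    rw [foldA_eq_counter]; rfl
  have hitems : (PySem.Dict.counter norms).items
      = (PySem.Set.ofList norms).map (fun k => (k, (norms.count k : Int))) :=
    PySem.Dict.items_counter norms
  obtain ⟨h0, t0, hs⟩ : ∃ h0 t0, (PySem.Dict.counter norms).items = h0 :: t0 := by
    cases hni : (PySem.Dict.counter norms).items with
    | nil =>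
      exfalso
      obtain ⟨v, vs, hv⟩ := List.exists_cons_of_ne_nil hne
      have hmem : v ∈ PySem.Set.ofList norms := by
        rw [PySem.Set.mem_ofList]; rw [hv]; exact List.mem_cons_self
      have : (v, (norms.count v : Int)) ∈ (PySem.Dict.counter norms).items := by
        rw [hitems]; exact List.mem_map.mpr ⟨v, hmem, rfl⟩
      rw [hni] at this; exact absurd this (List.not_mem_nil)
    | cons a b => exact ⟨a, b, rfl⟩
  obtain ⟨m, hmax, hmem, hge, hall⟩ := max2_cons_spec t0 h0
  have hA : choose_common_value_py values = some m.1 := by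
    unfold choose_common_value_py
    rw [hfold]
    show (if (PySem.Dict.counter norms).items = [] then (none : Option String)
      else match PySem.List.max2? (PySem.Dict.counter norms).items (fun p => p.2) (fun p => p.1) with
        | none => none | some p => some p.1) = some m.1
    rw [hs, hmax]
    simp
  refine ⟨m.1, hA, ?_, ?_⟩
  · -- membership
    have : m ∈ (PySem.Dict.counter norms).items := by
      rw [hs]; rcases hmem with h | h
      · exact h ▸ List.mem_cons_self
      · exact List.mem_cons_of_mem _ h
    rw [hitems] at this
    obtain ⟨k, hk, he⟩ := List.mem_map.mp this
    rw [← he]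
    exact (PySem.Set.mem_ofList _ _).mp hk
  · -- maximality
    intro v hv
    have hvmem : (v, (norms.count v : Int)) ∈ (PySem.Dict.counter norms).items := by
      rw [hitems]
      exact List.mem_map.mpr ⟨v, (PySem.Set.mem_ofList _ _).mpr hv, rfl⟩
    have hmIn : m ∈ (PySem.Dict.counter norms).items := by
      rw [hs]; rcases hmem with h | h
      · exact h ▸ List.mem_cons_self
      · exact List.mem_cons_of_mem _ h
    have hmpair : m.2 = (norms.count m.1 : Int) := by
      rw [hitems] at hmIn
      obtain ⟨k, _, he⟩ := List.mem_map.mp hmIn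
      rw [← he]
    have hlex : (norms.count v : Int) < m.2 ∨ ((norms.count v : Int) = m.2 ∧ v ≤ m.1) := by
      rw [hs] at hvmem
      rcases List.mem_cons.mp hvmem with h | h
      · have hge' := hge
        rw [← h] at hge'
        simpa using hge'
      · exact hall _ h
    rw [hmpair] at hlex
    exact int_lex hlex

-- B returns an IsArg value when the normalized list is non-empty
theorem b_isArg (values : List String) (hne : values.filterMap normalize_text_py ≠ []) :
    ∃ r, choose_common_value_py_alt values = some r ∧ IsArg (values.filterMap normalize_text_py) r := by
  set norms := values.filterMap normalize_text_py with hn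
  have hsne : PySem.List.sorted norms (fun x => x) false ≠ [] := by
    rw [Ne, PySem.List.sorted_eq_nil_iff]; exact hne
  obtain ⟨h, t, hs⟩ := List.exists_cons_of_ne_nil hsne
  have hB : choose_common_value_py_alt values = some (altSweep h h 0 0 (h :: t)) := by
    unfold choose_common_value_py_alt
    show (match PySem.List.sorted (values.filterMap normalize_text_py) (fun x => x) false with
      | [] => (none : Option String)
      | h :: t => some (altSweep h h 0 0 (h :: t))) = some (altSweep h h 0 0 (h :: t))
    rw [← hn, hs]
  have hpw0 : (h :: t).Pairwise (fun a b : String => a ≤ b) := by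
    have := PySem.List.sorted_pairwise norms (fun x : String => x)
    rw [hs] at this
    exact this
  have hht : ∀ x ∈ t, h ≤ x := fun x hx => (List.pairwise_cons.mp hpw0).1 x hx
  have hpt : t.Pairwise (fun a b : String => a ≤ b) := (List.pairwise_cons.mp hpw0).2
  obtain ⟨l, heq, hpairs, hpw, hcov⟩ := rle_char t h 1 hpt hht
  have hrle : rleAux h 0 (h :: t) = (h, 1 + (t.count h : Int)) :: l := by
    simp only [rleAux, if_pos]
    norm_num
    exact heq
  have hstep : pfStep (h, (0 : Int)) (h, 1 + (t.count h : Int)) = (h, 1 + (t.count h : Int)) := by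
    unfold pfStep
    rw [if_pos]
    simp only
    omega
  set p : String × Int := (h, 1 + (t.count h : Int)) with hp
  have hplt : ∀ x ∈ l, p.1 < x.1 := fun x hx => (List.pairwise_cons.mp hpw).1 x hx
  obtain ⟨hmem, h2, h1, hall⟩ := pf_spec l p (List.pairwise_cons.mp hpw).2 hplt
  have hsweep : altSweep h h 0 0 (h :: t) = (l.foldl pfStep p).1 := by
    rw [sweep_eq_pf, hrle, List.foldl_cons, hstep]
  set m := l.foldl pfStep p with hm
  -- counts of the rle pairs are counts in the sorted list s = h :: t
  have hcount : ∀ q, q = p ∨ q ∈ l → q.2 = (((h :: t).count q.1 : Nat) : Int) ∧ q.1 ∈ h :: t := by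
    intro q hq
    rcases hq with hq | hq
    · subst hq
      rw [hp]
      constructor
      · simp only [List.count_cons_self]; push_cast; ring
      · exact List.mem_cons_self
    · obtain ⟨hq1, hq2, hq3⟩ := hpairs q hq
      constructor
      · rw [List.count_cons_of_ne (Ne.symm hq2), hq3]
      · exact List.mem_cons_of_mem _ hq1
  have hArg : IsArg (h :: t) m.1 := by
    obtain ⟨hm2, hmIn⟩ := hcount m hmem
    constructor
    · exact hmIn
    · intro v hv
      by_cases hvh : v = h
      · subst hvh
        have hplex : p.2 < m.2 ∨ (p.2 = m.2 ∧ p.1 ≤ m.1) := by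
          rcases lt_or_eq_of_le h2 with h' | h'
          · exact Or.inl h'
          · exact Or.inr ⟨h', h1⟩
        obtain ⟨hp2, _⟩ := hcount p (Or.inl rfl)
        rw [hp2, hm2] at hplex
        have : p.1 = v := rfl
        rw [this] at hplex
        exact int_lex hplex
      · have hvt : v ∈ t := by
          rcases List.mem_cons.mp hv with h' | h'
          · exact absurd h' hvh
          · exact h'
        obtain ⟨q, hq, hq1⟩ := hcov v hvt hvh
        have hqlex := hall q hq
        obtain ⟨hq2, _⟩ := hcount q (Or.inr hq)
        rw [hq2, hm2, hq1] at hqlex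
        exact int_lex hqlex
  refine ⟨m.1, ?_, ?_⟩
  · rw [hB, hsweep, hm]
  · refine isArg_of_perm ?_ hArg
    rw [← hs]
    exact PySem.List.sorted_perm norms (fun x => x) false
  
theorem both_none (values : List String) (he : values.filterMap normalize_text_py = []) :
    choose_common_value_py values = none ∧ choose_common_value_py_alt values = none := by
  constructor
  · unfold choose_common_value_py
    rw [foldA_eq_counter, he]
    rfl
  · unfold choose_common_value_py_alt
    rw [he]
    rfl

-- ===== VERDICT (by name: the statement is the Claim_ definition above) =====
theorem choose_common_value_py_spec : Claim_equal_choose_common_value_py := by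
  intro values _
  unfold Spec_choose_common_value_py
  by_cases he : values.filterMap normalize_text_py = []
  · obtain ⟨h1, h2⟩ := both_none values he
    rw [h1, h2]
  · obtain ⟨r1, hr1, ha1⟩ := a_isArg values he
    obtain ⟨r2, hr2, ha2⟩ := b_isArg values he
    rw [hr1, hr2, isArg_unique ha1 ha2]
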